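-- pv_equiv track=rewrite | github.com/v111317/interviewbit | interviewbit_problems/solved/remove-consecutive-characters.py | solve
-- ===== SOURCE A (Python) =====
-- def solve(A, B):
--     n = B
--     str1 = A
--     buffer = []
--     result = []
--
--     buffer.append(str1[0])
--     count = 1
--     for i in range(1, len(str1)):
--
--         if str1[i]==str1[i-1]:
--             buffer.append(str1[i])
--             count += 1
--         else:
--             if count!=n:
--                 result += buffer
--
--             buffer = [str1[i]]
--             count = 1
--
--     if len(buffer)!=n:
--         result += buffer
--     return "".join(result)
-- ===== SOURCE B (Python) =====
-- def solve(A, B):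
--     n = len(A)
--     left = [1] * n
--     for i in range(1, n):
--         if A[i] == A[i - 1]:
--             left[i] = left[i - 1] + 1
--     right = [1] * n
--     for i in range(n - 2, -1, -1):
--         if A[i] == A[i + 1]:
--             right[i] = right[i + 1] + 1
--     return "".join(A[i] for i in range(n) if left[i] + right[i] - 1 != B)
-- ===== Notes on version B (the rewrite author's own statement) =====
-- stated objective: alternative
-- what changed: B makes a per-character keep/drop decision: two DP passes precompute, for every index, the run length extending left and right of it, and a final comprehension keeps A[i] iff left[i]+right[i]-1 != B; A instead groups characters into a run buffer with a counter and emits or drops whole runs.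
-- crash fix: On empty A the original raises IndexError (it reads A[0]); B returns ''. — e.g. on solve("", 1): A raises IndexError, B returns ""
import Mathlib
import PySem

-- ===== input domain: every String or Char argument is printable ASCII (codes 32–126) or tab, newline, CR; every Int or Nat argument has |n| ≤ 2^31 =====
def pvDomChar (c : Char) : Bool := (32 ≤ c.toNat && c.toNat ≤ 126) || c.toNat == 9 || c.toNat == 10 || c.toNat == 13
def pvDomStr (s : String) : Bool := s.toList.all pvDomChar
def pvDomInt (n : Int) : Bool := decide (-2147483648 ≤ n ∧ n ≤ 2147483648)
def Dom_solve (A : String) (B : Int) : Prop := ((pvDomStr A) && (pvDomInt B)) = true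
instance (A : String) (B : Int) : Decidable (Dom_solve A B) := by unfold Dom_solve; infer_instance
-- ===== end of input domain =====

-- B decides per character: two passes precompute each index's run length to the left and right,
-- then a filter keeps A[i] iff left[i]+right[i]-1 ≠ B (objective: alternative algorithm, same cost).

-- ===== PORT A =====
-- A's flush: result += buffer when the buffered run length differs from B (used in the loop and after it)
def pvFinish (B : Int) (st : List Char × Int × List Char) : List Char :=
  if (st.1.length : Int) ≠ B then st.2.2 ++ st.1 else st.2.2

-- one iteration of A's 'for i in range(1, len(str1))' body; state = (buffer, count, result)
def pvStepA (l : List Char) (B : Int) (st : List Char × Int × List Char) (i : Int) :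
    List Char × Int × List Char :=
  let ci := PySem.List.pyGetD l i ' '
  let cp := PySem.List.pyGetD l (i - 1) ' '
  if ci == cp then (st.1 ++ [ci], st.2.1 + 1, st.2.2)
  else if st.2.1 ≠ B then ([ci], 1, st.2.2 ++ st.1)
  else ([ci], 1, st.2.2)

def solve (A : String) (B : Int) : String :=
  match A.toList with
  | [] => ""   -- Python raises IndexError on str1[0] here; excluded by Pre_solve
  | c :: rest =>
    let l := c :: rest
    let st := (PySem.List.pyRange 1 (l.length : Int) 1).foldl (pvStepA l B) ([c], 1, [])
    String.ofList (pvFinish B st)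

-- ===== PORT B =====
-- Source B's first pass: left[i] = left[i-1]+1 if A[i]==A[i-1] else 1; the loop carries (A[i-1], left[i-1])
def pvLeftGo : Option (Char × Nat) → List Char → List Nat
  | _, [] => []
  | none, c :: rest => 1 :: pvLeftGo (some (c, 1)) rest
  | some (p, k), c :: rest =>
    (if c == p then k + 1 else 1) :: pvLeftGo (some (c, if c == p then k + 1 else 1)) rest

-- Source B's backward pass: right[i] = right[i+1]+1 if A[i]==A[i+1] else 1 (recursion from the tail)
def pvRight : List Char → List Nat
  | [] => []
  | [_] => [1]
  | c :: x :: rest =>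
    let r := pvRight (x :: rest)
    (if c == x then r.headD 0 + 1 else 1) :: r

-- Source B's final comprehension: keep A[i] iff left[i]+right[i]-1 != B
def pvSel (B : Int) (l : List Char) : List Char :=
  ((l.zip ((pvLeftGo none l).zip (pvRight l))).filter
    (fun p => ((p.2.1 : Int) + (p.2.2 : Int) - 1) != B)).map Prod.fst

def solve_alt (A : String) (B : Int) : String :=
  String.ofList (pvSel B A.toList)

-- ===== PRECONDITION & SPEC =====
-- A reads A[0] unconditionally, so it raises IndexError exactly on the empty string; Pre_ excludes only that.
def Pre_solve (A : String) (B : Int) : Prop := A ≠ ""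
instance (A : String) (B : Int) : Decidable (Pre_solve A B) := by unfold Pre_solve; infer_instance
def pvWitness_solve : String × Int := ("aabbbc", 2)

-- On empty A the original raises IndexError (it reads A[0]); B returns ''.
def Raises_solve (A : String) (B : Int) : Prop := A = ""
instance (A : String) (B : Int) : Decidable (Raises_solve A B) := by unfold Raises_solve; infer_instance
def pvRaiseWitness_solve : String × Int := ("", 1)
def pvRaiseWitnessOut_solve : String := ""

def Spec_solve (A : String) (B : Int) (out : String) : Prop := out = solve_alt A B
instance (A : String) (B : Int) (out : String) : Decidable (Spec_solve A B out) := by unfold Spec_solve; infer_instance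

-- ===== CLAIM (what is proved, stated in full; the proofs are below) =====
def Claim_equal_solve : Prop := ∀ (A : String) (B : Int), Dom_solve A B → Pre_solve A B → Spec_solve A B (solve A B)
def Claim_raises_solve : Prop := (∀ (A : String) (B : Int), Dom_solve A B → Raises_solve A B → ¬ Pre_solve A B) ∧ (Dom_solve (pvRaiseWitness_solve.1) (pvRaiseWitness_solve.2) ∧ Raises_solve (pvRaiseWitness_solve.1) (pvRaiseWitness_solve.2) ∧ solve_alt (pvRaiseWitness_solve.1) (pvRaiseWitness_solve.2) = pvRaiseWitnessOut_solve)

-- ===== LEMMAS AND PROOFS =====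

-- canonical run decomposition both ports are proved equal to
def pvRunsGo (B : Int) : List Char → List Char
  | [] => []
  | c :: rest =>
    let run := rest.takeWhile (fun x => x == c)
    let k := run.length + 1
    (if (k : Int) ≠ B then List.replicate k c else []) ++ pvRunsGo B (rest.dropWhile (fun x => x == c))
termination_by l => l.length
decreasing_by
  simp only [List.length_cons]
  exact Nat.lt_succ_of_le (List.length_dropWhile_le _ _)

-- ---- A-side: A's index loop rewritten as structural recursion carrying prev = str1[i-1]
def pvLoopA (B : Int) (prev : Char) : List Char → (List Char × Int × List Char) → (List Char × Int × List Char)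
  | [], st => st
  | x :: rs, st =>
    if x == prev then pvLoopA B x rs (st.1 ++ [x], st.2.1 + 1, st.2.2)
    else if st.2.1 ≠ B then pvLoopA B x rs ([x], 1, st.2.2 ++ st.1)
    else pvLoopA B x rs ([x], 1, st.2.2)

theorem pvFoldA_eq_loopA (B : Int) (rest : List Char) : ∀ (pre : List Char) (prev : Char)
    (st : List Char × Int × List Char),
    (PySem.List.pyRange ((pre.length : Int) + 1) (((pre ++ prev :: rest).length : Int)) 1).foldl
        (pvStepA (pre ++ prev :: rest) B) st
      = pvLoopA B prev rest st := by
  induction rest with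
  | nil =>
    intro pre prev st
    rw [PySem.List.pyRange_one_eq_nil (by simp)]
    simp [pvLoopA]
  | cons x rs ih =>
    intro pre prev st
    rw [PySem.List.pyRange_one_cons (by simp)]
    simp only [List.foldl_cons]
    have hx : PySem.List.pyGetD (pre ++ prev :: x :: rs) ((pre.length : Int) + 1) ' ' = x := by
      have h1 : ((pre.length : Int) + 1) = ((pre.length + 1 : Nat) : Int) := by push_cast; ring
      rw [h1, PySem.List.pyGetD_natCast]
      simp [List.getD]
    have hp : PySem.List.pyGetD (pre ++ prev :: x :: rs) ((pre.length : Int) + 1 - 1) ' ' = prev := by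
      have h1 : ((pre.length : Int) + 1 - 1) = ((pre.length : Nat) : Int) := by ring
      rw [h1, PySem.List.pyGetD_natCast]
      simp [List.getD]
    have hassoc : pre ++ prev :: x :: rs = (pre ++ [prev]) ++ x :: rs := by simp
    have hstart : (pre.length : Int) + 1 + 1 = ((pre ++ [prev]).length : Int) + 1 := by
      simp
    rw [pvStepA]
    simp only [hx, hp]
    by_cases hxp : (x == prev) = true
    · rw [if_pos hxp]
      conv_rhs => rw [pvLoopA]
      rw [if_pos hxp, hstart]
      conv_lhs => rw [hassoc]
      exact ih (pre ++ [prev]) x _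
    · rw [if_neg hxp]
      conv_rhs => rw [pvLoopA]
      rw [if_neg hxp]
      by_cases hc : st.2.1 ≠ B
      · rw [if_pos hc, if_pos hc, hstart]
        conv_lhs => rw [hassoc]
        exact ih (pre ++ [prev]) x _
      · rw [if_neg hc, if_neg hc, hstart]
        conv_lhs => rw [hassoc]
        exact ih (pre ++ [prev]) x _

theorem pvLoopA_finish (B : Int) (rest : List Char) : ∀ (prev : Char) (count : Nat) (result : List Char),
    pvFinish B (pvLoopA B prev rest (List.replicate count prev, (count : Int), result))
      = result ++ (if ((count + (rest.takeWhile (fun x => x == prev)).length : Int) ≠ B)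
                    then List.replicate (count + (rest.takeWhile (fun x => x == prev)).length) prev else [])
               ++ pvRunsGo B (rest.dropWhile (fun x => x == prev)) := by
  induction rest with
  | nil =>
    intro prev count result
    simp only [List.takeWhile_nil, List.dropWhile_nil, List.length_nil, Nat.add_zero]
    rw [pvRunsGo]
    simp only [List.append_nil]
    rw [pvLoopA, pvFinish]
    by_cases h : ((count : Int) ≠ B)
    · rw [if_pos (by simpa using h), if_pos (by simpa using h)]
    · rw [if_neg (by simpa using h), if_neg (by simpa using h)]
      simp
  | cons x rs ih =>
    intro prev count result
    by_cases hx : (x == prev) = true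
    · have hxe : x = prev := by simpa using hx
      subst hxe
      rw [pvLoopA, if_pos hx]
      have h1 : List.replicate count x ++ [x] = List.replicate (count + 1) x := by
        rw [← List.replicate_succ']
      have h2 : ((count : Int) + 1) = ((count + 1 : Nat) : Int) := by push_cast; ring
      rw [h1, h2, ih x (count + 1) result]
      rw [List.takeWhile_cons, List.dropWhile_cons, if_pos hx, if_pos hx]
      simp only [List.length_cons]
      have e2 : count + ((rs.takeWhile (fun y => y == x)).length + 1)
          = (count + 1) + (rs.takeWhile (fun y => y == x)).length := by omega
      have e3 : ((count : Int)) + (((rs.takeWhile (fun y => y == x)).length + 1 : Nat) : Int)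
          = (((count + 1 : Nat)) : Int) + ((rs.takeWhile (fun y => y == x)).length : Int) := by
        push_cast; ring
      rw [e2, e3]
    · rw [pvLoopA, if_neg hx]
      rw [List.takeWhile_cons, List.dropWhile_cons, if_neg hx, if_neg hx]
      rw [pvRunsGo]
      simp only [List.length_nil, Nat.add_zero, Nat.cast_zero, Int.add_zero]
      have ecast : ((((rs.takeWhile (fun y => y == x)).length + 1 : Nat)) : Int)
          = ((1 : Nat) : Int) + ((rs.takeWhile (fun y => y == x)).length : Int) := by
        push_cast; ring
      have enat : (rs.takeWhile (fun y => y == x)).length + 1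
          = 1 + (rs.takeWhile (fun y => y == x)).length := by omega
      rw [ecast, enat]
      by_cases hc : ((count : Int) ≠ B)
      · rw [if_pos hc, if_pos hc]
        have h := ih x 1 (result ++ List.replicate count prev)
        simp only [List.replicate_one, Nat.cast_one] at h
        simp only [Nat.cast_one]
        rw [h]
        simp [List.append_assoc]
      · rw [if_neg hc, if_neg hc]
        have h := ih x 1 result
        simp only [List.replicate_one, Nat.cast_one] at h
        simp only [Nat.cast_one]
        rw [h]
        simp [List.append_assoc]

theorem solve_eq_runs (A : String) (B : Int) (hpre : A ≠ "") :
    solve A B = String.ofList (pvRunsGo B A.toList) := by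
  unfold solve
  cases h : A.toList with
  | nil =>
    exfalso
    apply hpre
    have := congrArg String.ofList h
    simpa using this
  | cons c rest =>
    simp only []
    congr 1
    have h1 := pvFoldA_eq_loopA B rest [] c (([c]), 1, ([] : List Char))
    simp only [List.length_nil, Nat.cast_zero, zero_add, List.nil_append] at h1
    rw [h1]
    have h2 := pvLoopA_finish B rest c 1 []
    simp only [List.replicate_one, Nat.cast_one, List.nil_append] at h2
    rw [h2]
    conv_rhs => rw [pvRunsGo]
    have ecast : ((((rest.takeWhile (fun y => y == c)).length + 1 : Nat)) : Int)
        = (1 : Int) + ((rest.takeWhile (fun y => y == c)).length : Int) := by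
      push_cast; ring
    have enat : (rest.takeWhile (fun y => y == c)).length + 1
        = 1 + (rest.takeWhile (fun y => y == c)).length := by omega
    rw [ecast, enat]

-- ---- B-side lemmas
theorem pvLeftGo_restart (p : Char) (k : Nat) (x : Char) (rest : List Char) (h : (x == p) = false) :
    pvLeftGo (some (p, k)) (x :: rest) = pvLeftGo none (x :: rest) := by
  simp [pvLeftGo, h]

theorem pvLeftGo_run (c : Char) : ∀ (k : Nat) (j : Nat) (d : List Char),
    pvLeftGo (some (c, j)) (List.replicate k c ++ d)
      = List.range' (j + 1) k ++ pvLeftGo (some (c, j + k)) d := by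
  intro k
  induction k with
  | zero => intro j d; simp
  | succ m ih =>
    intro j d
    rw [List.replicate_succ, List.cons_append, pvLeftGo]
    simp only [beq_self_eq_true, if_pos]
    rw [ih (j + 1) d, List.range'_succ]
    have : j + 1 + m = j + (m + 1) := by omega
    rw [this]
    simp

theorem reverse_range'_one_succ (m : Nat) :
    (List.range' 1 (m + 1)).reverse = (m + 1) :: (List.range' 1 m).reverse := by
  rw [List.range'_concat, List.reverse_append]
  simp [Nat.add_comm]

theorem pvRight_run (c : Char) (d : List Char)
    (hd : ∀ x, d.head? = some x → (x == c) = false) : ∀ (k : Nat),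
    pvRight (List.replicate k c ++ d) = (List.range' 1 k).reverse ++ pvRight d := by
  intro k
  induction k with
  | zero => simp
  | succ m ih =>
    rw [List.replicate_succ, List.cons_append]
    cases m with
    | zero =>
      simp only [List.replicate_zero, List.nil_append]
      cases d with
      | nil => simp [pvRight]
      | cons x tl =>
        have hx : (c == x) = false := by
          have h1 : ¬ (x = c) := by simpa using hd x rfl
          simp only [beq_eq_false_iff_ne, ne_eq]
          exact fun h => h1 h.symm
        rw [pvRight]
        simp [hx]
    | succ m' =>
      have hcons : List.replicate (m' + 1) c ++ d = c :: (List.replicate m' c ++ d) := by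
        rw [List.replicate_succ, List.cons_append]
      rw [hcons, pvRight, ← hcons, ih]
      simp [reverse_range'_one_succ]

theorem pvLeftGo_none_run (c : Char) (k : Nat) (d : List Char)
    (hd : ∀ x, d.head? = some x → (x == c) = false) :
    pvLeftGo none (List.replicate k c ++ d)
      = List.range' 1 k ++ pvLeftGo none d := by
  cases k with
  | zero => simp
  | succ m =>
    rw [List.replicate_succ, List.cons_append, pvLeftGo, pvLeftGo_run c m 1 d]
    have htail : pvLeftGo (some (c, 1 + m)) d = pvLeftGo none d := by
      cases d with
      | nil => simp [pvLeftGo]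
      | cons x tl => exact pvLeftGo_restart c (1 + m) x tl (hd x (by simp))
    rw [htail, List.range'_succ]
    simp

theorem pvRunZip_filter (B : Int) (c : Char) (k : Nat) :
    (((List.replicate k c).zip ((List.range' 1 k).zip ((List.range' 1 k).reverse))).filter
        (fun p => ((p.2.1 : Int) + (p.2.2 : Int) - 1) != B)).map Prod.fst
      = if (k : Int) ≠ B then List.replicate k c else [] := by
  have hrep : List.replicate k c = (List.range k).map (Function.const Nat c) := by
    rw [List.map_const, List.length_range]
  rw [hrep, List.reverse_range', List.range'_eq_map_range, List.zip_map', List.zip_map',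
    List.filter_map]
  have hcongr : ∀ i ∈ List.range k,
      ((fun p : Char × Nat × Nat => ((p.2.1 : Int) + (p.2.2 : Int) - 1) != B) ∘
        (fun a : Nat => (Function.const Nat c a, 1 + a, 1 + k - 1 - a))) i
      = (fun _ : Nat => (k : Int) != B) i := by
    intro i hi
    have hik : i < k := List.mem_range.mp hi
    simp only [Function.comp]
    congr 1
    omega
  rw [List.filter_congr hcongr]
  by_cases hk : (k : Int) ≠ B
  · rw [if_pos hk]
    have : ((k : Int) != B) = true := by simpa using hk
    simp only [this, List.filter_true]
    rw [List.map_map]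
    have hfst : (Prod.fst ∘ fun a : Nat => (Function.const Nat c a, 1 + a, 1 + k - 1 - a))
        = fun _ : Nat => c := rfl
    rw [hfst, List.map_const', List.length_range]
    exact hrep
  · rw [if_neg hk]
    have : ((k : Int) != B) = false := by simpa using hk
    simp [this]

theorem pvSel_run (B : Int) (c : Char) (k : Nat) (d : List Char)
    (hd : ∀ x, d.head? = some x → (x == c) = false) :
    pvSel B (List.replicate k c ++ d)
      = (if (k : Int) ≠ B then List.replicate k c else []) ++ pvSel B d := by
  unfold pvSel
  rw [pvLeftGo_none_run c k d hd, pvRight_run c d hd k]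
  rw [List.zip_append (by simp), List.zip_append (by simp),
    List.filter_append, List.map_append, pvRunZip_filter]

theorem head?_dropWhile (p : Char → Bool) : ∀ (l : List Char) (x : Char),
    (l.dropWhile p).head? = some x → p x = false := by
  intro l
  induction l with
  | nil => intro x h; simp [List.dropWhile] at h
  | cons a tl ih =>
    intro x h
    rw [List.dropWhile_cons] at h
    by_cases ha : p a = true
    · rw [if_pos ha] at h; exact ih x h
    · rw [if_neg ha] at h
      simp only [List.head?_cons, Option.some.injEq] at h
      subst h
      simpa using ha

theorem pvSel_eq_runs (B : Int) : ∀ (n : Nat) (l : List Char), l.length ≤ n →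
    pvSel B l = pvRunsGo B l := by
  intro n
  induction n with
  | zero =>
    intro l hl
    have : l = [] := List.eq_nil_of_length_eq_zero (Nat.le_zero.mp hl)
    subst this
    simp [pvSel, pvRunsGo, pvLeftGo, pvRight]
  | succ m ih =>
    intro l hl
    cases l with
    | nil => simp [pvSel, pvRunsGo, pvLeftGo, pvRight]
    | cons c rest =>
      have ht : rest.takeWhile (fun x => x == c)
          = List.replicate (rest.takeWhile (fun x => x == c)).length c := by
        apply List.eq_replicate_of_mem
        intro b hb
        have := List.mem_takeWhile_imp hb
        simpa using this
      have hsplit : c :: rest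
          = List.replicate ((rest.takeWhile (fun x => x == c)).length + 1) c
            ++ rest.dropWhile (fun x => x == c) := by
        rw [List.replicate_succ, List.cons_append]
        conv_lhs => rw [← List.takeWhile_append_dropWhile (p := fun x => x == c) (l := rest)]
        rw [← ht]
      have hd : ∀ x, (rest.dropWhile (fun x => x == c)).head? = some x → (x == c) = false :=
        fun x hx => head?_dropWhile _ rest x hx
      rw [hsplit, pvSel_run B c _ _ hd]
      conv_rhs => rw [← hsplit, pvRunsGo]
      have hdl : (rest.dropWhile (fun x => x == c)).length ≤ m := by
        have h1 := List.length_dropWhile_le (p := fun x => x == c) (l := rest)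
        simp only [List.length_cons] at hl
        omega
      rw [ih _ hdl]

-- ===== VERDICT (by name: the statement is the Claim_ definition above) =====
theorem solve_spec : Claim_equal_solve := by
  intro A B hdom hpre
  unfold Spec_solve solve_alt
  rw [solve_eq_runs A B hpre, pvSel_eq_runs B A.toList.length A.toList le_rfl]

@[simp] theorem solve_raises : Claim_raises_solve := by
  unfold Claim_raises_solve
  refine ⟨fun A B _ h hp => hp h, by decide, by decide, ?_⟩
  show solve_alt "" 1 = ""
  simp [solve_alt, pvSel, pvLeftGo, pvRight]
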